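-- pv_equiv track=rewrite | github.com/xarkenz/advent-of-code | python/day07.py | check_p1
-- ===== SOURCE A (Python) =====
-- def check_p1(goal: int, lhs: int, operands: list[int], rhs_index: int) -> bool:
--     if rhs_index == len(operands):
--         return lhs == goal
--     elif lhs > goal:
--         return False
--     rhs = operands[rhs_index]
--     # Addition
--     if check_p1(goal, lhs + rhs, operands, rhs_index + 1):
--         return True
--     # Multiplication
--     elif check_p1(goal, lhs * rhs, operands, rhs_index + 1):
--         return True
--     else:
--         return False
-- ===== SOURCE B (Python) =====
-- def check_p1(goal: int, lhs: int, operands: list[int], rhs_index: int) -> bool: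
--     # Breadth-first over the SET of reachable values, one operand at a time,
--     # deduplicating and pruning values that already exceed the goal.
--     values = {lhs}
--     i = rhs_index
--     while i != len(operands):
--         values = {v for v in values if v <= goal}
--         if not values:
--             return False
--         rhs = operands[i]
--         values = {w for v in values for w in (v + rhs, v * rhs)}
--         i += 1
--     return goal in values
-- ===== Notes on version B (the rewrite author's own statement) =====
-- stated objective: alternative
-- what changed: Replaces A's depth-first recursion over all +/* operator choices by an iterative breadth-first pass that carries the deduplicated set of reachable intermediate values, pruning values above the goal at each step.
import Mathlib
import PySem

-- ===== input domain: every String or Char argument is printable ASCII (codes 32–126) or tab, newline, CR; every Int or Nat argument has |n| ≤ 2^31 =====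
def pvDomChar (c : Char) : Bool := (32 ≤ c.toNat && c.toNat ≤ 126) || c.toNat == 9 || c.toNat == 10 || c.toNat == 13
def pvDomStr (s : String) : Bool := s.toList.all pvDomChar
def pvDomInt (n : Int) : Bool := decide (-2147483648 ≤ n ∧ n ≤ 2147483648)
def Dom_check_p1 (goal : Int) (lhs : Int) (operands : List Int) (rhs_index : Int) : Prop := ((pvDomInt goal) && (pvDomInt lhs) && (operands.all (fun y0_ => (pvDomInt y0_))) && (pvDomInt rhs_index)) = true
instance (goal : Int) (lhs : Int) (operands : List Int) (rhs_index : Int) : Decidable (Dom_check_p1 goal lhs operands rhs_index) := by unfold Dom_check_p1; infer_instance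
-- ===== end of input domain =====

-- B replaces A's depth-first recursion over all +/* choices by a breadth-first pass that keeps the
-- SET of reachable values (deduplicated, pruned at > goal) — a genuinely different traversal, same results.

-- ===== PORT A =====
def check_p1 (goal : Int) (lhs : Int) (operands : List Int) (rhs_index : Int) : Bool :=
  if rhs_index = (operands.length : Int) then lhs == goal
  else if lhs > goal then false
  else
    match h : PySem.List.pyGet? operands rhs_index with
    | none => false  -- Python raises IndexError here (outside Pre_check_p1)
    | some rhs =>
      if check_p1 goal (lhs + rhs) operands (rhs_index + 1) then true
      else if check_p1 goal (lhs * rhs) operands (rhs_index + 1) then true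
      else false
termination_by ((operands.length : Int) + 1 - rhs_index).toNat
decreasing_by
  all_goals
    have hin : PySem.Raise.InRange operands.length rhs_index := by
      by_contra hc
      rw [← PySem.List.pyGet?_eq_none_iff] at hc
      simp [hc] at h
    obtain ⟨-, h2⟩ := hin
    omega

-- ===== PORT B =====
def check_p1_altStep (rhs : Int) (survivors : PySem.Set Int) : PySem.Set Int :=
  survivors.foldl (fun acc v => PySem.Set.add (PySem.Set.add acc (v + rhs)) (v * rhs)) PySem.Set.empty

def check_p1_altLoop (goal : Int) (operands : List Int) (i : Int) (values : PySem.Set Int) : Bool :=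
  if i = (operands.length : Int) then PySem.Set.contains values goal
  else
    let survivors : PySem.Set Int := values.filter (fun v => decide (v ≤ goal))
    if survivors.isEmpty then false
    else
      match h : PySem.List.pyGet? operands i with
      | none => false  -- Python raises IndexError here (outside Pre_check_p1)
      | some rhs => check_p1_altLoop goal operands (i + 1) (check_p1_altStep rhs survivors)
termination_by ((operands.length : Int) + 1 - i).toNat
decreasing_by
  have hin : PySem.Raise.InRange operands.length i := by
    by_contra hc
    rw [← PySem.List.pyGet?_eq_none_iff] at hc
    simp [hc] at h
  obtain ⟨-, h2⟩ := hin
  omega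

def check_p1_alt (goal : Int) (lhs : Int) (operands : List Int) (rhs_index : Int) : Bool :=
  check_p1_altLoop goal operands rhs_index (PySem.Set.add PySem.Set.empty lhs)

-- ===== PRECONDITION & SPEC =====
-- Pre_ is exactly where the Python A returns: either rhs_index is in indexing range -len..len
-- (at len the base case fires), or lhs > goal, where A prunes before the out-of-range read;
-- everywhere else A (and B) raise IndexError.
def Pre_check_p1 (goal : Int) (lhs : Int) (operands : List Int) (rhs_index : Int) : Prop :=
  (-(operands.length : Int) ≤ rhs_index ∧ rhs_index ≤ (operands.length : Int)) ∨ goal < lhs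
instance (goal : Int) (lhs : Int) (operands : List Int) (rhs_index : Int) : Decidable (Pre_check_p1 goal lhs operands rhs_index) := by unfold Pre_check_p1; infer_instance

def pvWitness_check_p1 : Int × Int × List Int × Int := (6, 0, [2, 3], 0)

def Spec_check_p1 (goal : Int) (lhs : Int) (operands : List Int) (rhs_index : Int) (out : Bool) : Prop := out = check_p1_alt goal lhs operands rhs_index
instance (goal : Int) (lhs : Int) (operands : List Int) (rhs_index : Int) (out : Bool) : Decidable (Spec_check_p1 goal lhs operands rhs_index out) := by unfold Spec_check_p1; infer_instance

-- ===== CLAIM (what is proved, stated in full; the proofs are below) =====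
def Claim_equal_check_p1 : Prop := ∀ (goal : Int) (lhs : Int) (operands : List Int) (rhs_index : Int), Dom_check_p1 goal lhs operands rhs_index → Pre_check_p1 goal lhs operands rhs_index → Spec_check_p1 goal lhs operands rhs_index (check_p1 goal lhs operands rhs_index)

-- ===== LEMMAS AND PROOFS =====

-- membership in the fold building {v+rhs, v*rhs : v ∈ l} on top of acc
lemma mem_check_p1_altStep_aux (rhs : Int) :
    ∀ (l acc : List Int) (w : Int),
      w ∈ List.foldl (fun acc v => PySem.Set.add (PySem.Set.add acc (v + rhs)) (v * rhs)) acc l ↔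
        w ∈ acc ∨ ∃ v ∈ l, w = v + rhs ∨ w = v * rhs := by
  intro l
  induction l with
  | nil => intro acc w; simp
  | cons x xs ih =>
    intro acc w
    simp only [List.foldl_cons, ih, PySem.Set.mem_add, List.mem_cons]
    constructor
    · rintro (((h | h) | h) | ⟨v, hv, h⟩)
      · exact Or.inl h
      · exact Or.inr ⟨x, Or.inl rfl, Or.inl h⟩
      · exact Or.inr ⟨x, Or.inl rfl, Or.inr h⟩
      · exact Or.inr ⟨v, Or.inr hv, h⟩
    · rintro (h | ⟨v, (rfl | hv), h⟩)
      · exact Or.inl (Or.inl (Or.inl h))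
      · rcases h with h | h
        · exact Or.inl (Or.inl (Or.inr h))
        · exact Or.inl (Or.inr h)
      · exact Or.inr ⟨v, hv, h⟩

lemma mem_check_p1_altStep (rhs : Int) (survivors : List Int) (w : Int) :
    w ∈ check_p1_altStep rhs survivors ↔ ∃ v ∈ survivors, w = v + rhs ∨ w = v * rhs := by
  unfold check_p1_altStep
  rw [mem_check_p1_altStep_aux]
  simp [PySem.Set.empty]

-- the loop computes "some value in the set completes to goal" (A's recursion, pointwise)
lemma check_p1_altLoop_eq (goal : Int) (operands : List Int) :
    ∀ (k : Nat) (i : Int) (values : List Int),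
      -(operands.length : Int) ≤ i → i ≤ (operands.length : Int) →
      ((operands.length : Int) - i).toNat = k →
      check_p1_altLoop goal operands i values =
        values.any (fun v => check_p1 goal v operands i) := by
  intro k
  induction k with
  | zero =>
    intro i values h1 h2 hk
    have hi : i = (operands.length : Int) := by omega
    subst hi
    rw [check_p1_altLoop]
    rw [if_pos rfl]
    have hbase : ∀ v : Int, check_p1 goal v operands (operands.length : Int) = (v == goal) := by
      intro v
      rw [check_p1.eq_def]
      rw [if_pos rfl]
    simp only [hbase]
    rw [Bool.eq_iff_iff]
    simp [PySem.Set.contains, List.any_eq_true]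
  | succ k ih =>
    intro i values h1 h2 hk
    have hlt : i < (operands.length : Int) := by omega
    have hne : i ≠ (operands.length : Int) := by omega
    obtain ⟨rhs, hr⟩ : ∃ rhs, PySem.List.pyGet? operands i = some rhs := by
      cases hg : PySem.List.pyGet? operands i with
      | none =>
        rw [PySem.List.pyGet?_eq_none_iff] at hg
        exact absurd ⟨h1, hlt⟩ hg
      | some rhs => exact ⟨rhs, rfl⟩
    rw [check_p1_altLoop]
    simp only [hne, if_false]
    have ihc := ih (i + 1) (check_p1_altStep rhs (values.filter (fun v => decide (v ≤ goal))))
      (by omega) (by omega) (by omega)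
    -- unfold A's recursion at each element of values
    have hA : ∀ v : Int, check_p1 goal v operands i =
        (decide (v ≤ goal) &&
          (check_p1 goal (v + rhs) operands (i + 1) || check_p1 goal (v * rhs) operands (i + 1))) := by
      intro v
      rw [check_p1.eq_def]
      rw [if_neg hne]
      by_cases hv : v ≤ goal
      · rw [if_neg (by omega : ¬ v > goal)]
        split
        · next heq => rw [hr] at heq; simp at heq
        · next rhs' heq =>
            rw [hr] at heq; injection heq with he; subst he
            simp only [hv, decide_true, Bool.true_and]
            by_cases c1 : check_p1 goal (v + rhs) operands (i + 1) = true <;>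
              by_cases c2 : check_p1 goal (v * rhs) operands (i + 1) = true <;>
              simp [c1, c2]
      · rw [if_pos (by omega : v > goal)]
        simp [hv]
    by_cases hemp : (values.filter (fun v => decide (v ≤ goal))).isEmpty
    · rw [if_pos hemp]
      rw [List.isEmpty_iff, List.filter_eq_nil_iff] at hemp
      symm
      rw [List.any_eq_false]
      intro v hv
      rw [hA v]
      have := hemp v hv
      simp at this
      simp [this]
    · rw [if_neg hemp]
      split
      · next heq => rw [hr] at heq; simp at heq
      · next rhs' heq =>
          rw [hr] at heq; injection heq with he; subst he
          rw [ihc, Bool.eq_iff_iff]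
          simp only [List.any_eq_true]
          constructor
          · rintro ⟨w, hw, hcw⟩
            rw [mem_check_p1_altStep] at hw
            obtain ⟨v, hv, hw⟩ := hw
            rw [List.mem_filter] at hv
            refine ⟨v, hv.1, ?_⟩
            rw [hA v]
            rcases hw with rfl | rfl <;> simp [hv.2, hcw]
          · rintro ⟨v, hv, hcv⟩
            rw [hA v] at hcv
            simp only [Bool.and_eq_true, Bool.or_eq_true, decide_eq_true_eq] at hcv
            obtain ⟨hvg, hor⟩ := hcv
            rcases hor with hc | hc
            · exact ⟨v + rhs, (mem_check_p1_altStep rhs _ _).mpr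
                ⟨v, List.mem_filter.mpr ⟨hv, by simpa using hvg⟩, Or.inl rfl⟩, hc⟩
            · exact ⟨v * rhs, (mem_check_p1_altStep rhs _ _).mpr
                ⟨v, List.mem_filter.mpr ⟨hv, by simpa using hvg⟩, Or.inr rfl⟩, hc⟩

-- ===== VERDICT (by name: the statement is the Claim_ definition above) =====
theorem check_p1_spec : Claim_equal_check_p1 := by
  intro goal lhs operands rhs_index _ hpre
  unfold Spec_check_p1 check_p1_alt
  by_cases hin : -(operands.length : Int) ≤ rhs_index ∧ rhs_index ≤ (operands.length : Int)
  · rw [check_p1_altLoop_eq goal operands ((operands.length : Int) - rhs_index).toNat rhs_index _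
      hin.1 hin.2 rfl]
    simp [PySem.Set.empty, PySem.Set.add, PySem.Set.contains]
  · have hgl : goal < lhs := hpre.resolve_left hin
    have hne : rhs_index ≠ (operands.length : Int) := by omega
    rw [check_p1, check_p1_altLoop]
    have : lhs > goal := hgl
    have hf : ¬ lhs ≤ goal := by omega
    simp [hne, this, PySem.Set.empty, PySem.Set.add, PySem.Set.contains, hf]
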